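-- pv_equiv track=rewrite | github.com/ravalrupalj/BrainTeasers | Edabit/Combined.py | consecutive_combo
-- ===== SOURCE A (Python) =====
-- def consecutive_combo(lst1, lst2):
--     t=lst1+lst2
--     sort=sorted(t)
--     s=''
--     for each in sort:
--         s=s+str(each)
--     maximum=max(t)
--     minimum=min(t)
--     for i in range(minimum,maximum+1):
--         if str(i) not in s:
--             return False
--     return True
-- ===== SOURCE B (Python) =====
-- def consecutive_combo(lst1, lst2):
--     t = lst1 + lst2
--     s = ''.join(str(x) for x in sorted(t))
--     lo, hi = min(t), max(t)
--     d = max(len(str(lo)), len(str(hi)))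
--     subs = set()
--     u = s
--     while u:
--         for k in range(1, d + 1):
--             subs.add(u[:k])
--         u = u[1:]
--     return all(str(i) in subs for i in range(lo, hi + 1))
-- ===== Notes on version B (the rewrite author's own statement) =====
-- stated objective: alternative
-- what changed: Instead of scanning the whole concatenated string once per integer in [min,max] (substring test per query), B precomputes one set of all substrings of length at most d = max digit-length of the endpoints, then answers every query with a set lookup.
import Mathlib
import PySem

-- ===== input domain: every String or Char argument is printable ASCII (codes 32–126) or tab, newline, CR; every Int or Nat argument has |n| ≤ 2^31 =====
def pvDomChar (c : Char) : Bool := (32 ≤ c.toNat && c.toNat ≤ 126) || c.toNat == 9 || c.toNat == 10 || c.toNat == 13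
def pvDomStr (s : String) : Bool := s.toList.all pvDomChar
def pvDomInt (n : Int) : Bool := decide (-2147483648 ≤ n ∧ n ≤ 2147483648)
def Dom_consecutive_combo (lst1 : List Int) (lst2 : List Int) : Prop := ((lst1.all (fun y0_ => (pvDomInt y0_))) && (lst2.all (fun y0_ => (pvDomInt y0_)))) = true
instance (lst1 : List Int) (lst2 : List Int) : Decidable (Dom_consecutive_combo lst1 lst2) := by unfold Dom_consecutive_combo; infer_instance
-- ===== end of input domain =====

-- B replaces A's per-integer substring scan of the concatenated string by one precomputed
-- set of all its substrings of bounded length, answering each range query by a set lookup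
-- (alternative algorithm; not claimed faster).


-- ===== PORT A =====
-- A's 'for i in range(minimum, maximum+1)' with early 'return False', as counter recursion
def ccLoopA (s : List Char) (i b : Int) : Bool :=
  if i < b then
    if (PySem.Chars.isIn (PySem.Int.toChars i) s) = false then false
    else ccLoopA s (i + 1) b
  else true
termination_by (b - i).toNat
decreasing_by omega

def consecutive_combo (lst1 : List Int) (lst2 : List Int) : Bool :=
  let t := lst1 ++ lst2
  let sort := PySem.List.sorted t (fun x => x) false
  let s := sort.foldl (fun s each => s ++ PySem.Int.toChars each) []
  match PySem.List.max? t (fun x => x) with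
  | none => false  -- unreachable: Python raises ValueError on empty t (excluded by Pre_)
  | some maximum =>
    match PySem.List.min? t (fun x => x) with
    | none => false  -- unreachable likewise
    | some minimum => ccLoopA s minimum (maximum + 1)


-- ===== PORT B =====
-- B's 'all(str(i) in subs for i in range(lo, hi + 1))': generator with early exit, as counter recursion
def ccLoopB (subs : PySem.Set (List Char)) (i b : Int) : Bool :=
  if i < b then
    if PySem.Set.contains subs (PySem.Int.toChars i) then ccLoopB subs (i + 1) b
    else false
  else true
termination_by (b - i).toNat
decreasing_by omega

-- inner 'for k in range(1, d+1): subs.add(u[:k])' (u[:k] = take k, exact for k ≥ 0),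
-- then 'u = u[1:]' — recursion over the suffixes of s
def ccCollect (u : List Char) (d : Nat) (subs : PySem.Set (List Char)) : PySem.Set (List Char) :=
  match u with
  | [] => subs
  | _ :: rest =>
      ccCollect rest d ((List.range d).foldl (fun acc k => PySem.Set.add acc (u.take (k + 1))) subs)

def consecutive_combo_alt (lst1 : List Int) (lst2 : List Int) : Bool :=
  let t := lst1 ++ lst2
  let s := ((PySem.List.sorted t (fun x => x) false).map PySem.Int.toChars).flatten
  match PySem.List.min? t (fun x => x) with
  | none => false  -- unreachable under Pre_ (min of empty raises)
  | some lo =>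
    match PySem.List.max? t (fun x => x) with
    | none => false  -- unreachable likewise
    | some hi =>
      let d := max (PySem.Int.toChars lo).length (PySem.Int.toChars hi).length
      let subs := ccCollect s d PySem.Set.empty
      ccLoopB subs lo (hi + 1)


-- ===== PRECONDITION & SPEC =====
-- Pre_ excludes only the empty combined list, on which Python A raises ValueError (max of empty sequence).
def Pre_consecutive_combo (lst1 : List Int) (lst2 : List Int) : Prop := lst1 ++ lst2 ≠ []
instance (lst1 : List Int) (lst2 : List Int) : Decidable (Pre_consecutive_combo lst1 lst2) := by unfold Pre_consecutive_combo; infer_instance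
def pvWitness_consecutive_combo : List Int × List Int := ([1, 3], [2])
def Spec_consecutive_combo (lst1 : List Int) (lst2 : List Int) (out : Bool) : Prop := out = consecutive_combo_alt lst1 lst2
instance (lst1 : List Int) (lst2 : List Int) (out : Bool) : Decidable (Spec_consecutive_combo lst1 lst2 out) := by unfold Spec_consecutive_combo; infer_instance

-- ===== CLAIM (what is proved, stated in full; the proofs are below) =====
def Claim_equal_consecutive_combo : Prop := ∀ (lst1 : List Int) (lst2 : List Int), Dom_consecutive_combo lst1 lst2 → Pre_consecutive_combo lst1 lst2 → Spec_consecutive_combo lst1 lst2 (consecutive_combo lst1 lst2)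

-- ===== LEMMAS AND PROOFS =====

-- A's string-building fold equals B's join
theorem ccFold_eq (l : List Int) (init : List Char) :
    l.foldl (fun s each => s ++ PySem.Int.toChars each) init = init ++ (l.map PySem.Int.toChars).flatten := by
  induction l generalizing init with
  | nil => simp
  | cons x xs ih => simp [List.foldl_cons, ih]

-- membership in the collected substring set
theorem mem_foldl_add {α β : Type} [BEq α] [LawfulBEq α] (l : List β) (f : β → α)
    (s : PySem.Set α) (x : α) :
    x ∈ l.foldl (fun acc k => PySem.Set.add acc (f k)) s ↔ x ∈ s ∨ ∃ k ∈ l, x = f k := by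
  induction l generalizing s with
  | nil => simp
  | cons y ys ih =>
      simp only [List.foldl_cons, ih, PySem.Set.mem_add, List.mem_cons]
      constructor
      · rintro ((h | h) | ⟨k, hk, rfl⟩)
        · exact Or.inl h
        · exact Or.inr ⟨y, Or.inl rfl, h⟩
        · exact Or.inr ⟨k, Or.inr hk, rfl⟩
      · rintro (h | ⟨k, (rfl | hk), rfl⟩)
        · exact Or.inl (Or.inl h)
        · exact Or.inl (Or.inr rfl)
        · exact Or.inr ⟨k, hk, rfl⟩

theorem mem_ccCollect (u : List Char) (d : Nat) (subs : PySem.Set (List Char)) (x : List Char) :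
    x ∈ ccCollect u d subs ↔ x ∈ subs ∨ ∃ t, t <:+ u ∧ t ≠ [] ∧ ∃ k < d, x = t.take (k + 1) := by
  induction u generalizing subs with
  | nil =>
      simp only [ccCollect]
      constructor
      · exact Or.inl
      · rintro (h | ⟨t, hts, htne, _⟩)
        · exact h
        · exact absurd (List.suffix_nil.mp hts) htne
  | cons c rest ih =>
      rw [ccCollect, ih, mem_foldl_add]
      constructor
      · rintro (⟨h | ⟨k, hk, rfl⟩⟩ | ⟨t, hts, htne, k, hk, rfl⟩)
        · exact Or.inl h
        · exact Or.inr ⟨c :: rest, List.suffix_rfl, List.cons_ne_nil _ _, k, List.mem_range.mp hk, rfl⟩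
        · exact Or.inr ⟨t, hts.trans (List.suffix_cons c rest), htne, k, hk, rfl⟩
      · rintro (h | ⟨t, hts, htne, k, hk, rfl⟩)
        · exact Or.inl (Or.inl h)
        · rcases List.suffix_cons_iff.mp hts with rfl | hts'
          · exact Or.inl (Or.inr ⟨k, List.mem_range.mpr hk, rfl⟩)
          · exact Or.inr ⟨t, hts', htne, k, hk, rfl⟩

-- characterization: the collected set over s holds exactly the nonempty infixes of length ≤ d
theorem mem_ccCollect_iff_infix (s : List Char) (d : Nat) (x : List Char)
    (hne : x ≠ []) (hlen : x.length ≤ d) :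
    x ∈ ccCollect s d PySem.Set.empty ↔ x <:+: s := by
  rw [mem_ccCollect]
  constructor
  · rintro (h | ⟨t, hts, _, k, _, rfl⟩)
    · simp [PySem.Set.empty] at h
    · exact List.infix_iff_prefix_suffix.mpr ⟨t, List.take_prefix _ _, hts⟩
  · intro hinf
    obtain ⟨t, hpre, hsuf⟩ := List.infix_iff_prefix_suffix.mp hinf
    have hx : x = t.take x.length := List.prefix_iff_eq_take.mp hpre
    have hpos : 0 < x.length := List.length_pos_iff.mpr hne
    refine Or.inr ⟨t, hsuf, ?_, x.length - 1, by omega, ?_⟩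
    · rintro rfl
      exact hne (List.prefix_nil.mp hpre)
    · rw [Nat.sub_add_cancel hpos]
      exact hx

-- length of str(i) is monotone towards the endpoints
theorem toChars_len_le (lo i hi : Int) (h1 : lo ≤ i) (h2 : i ≤ hi) :
    (PySem.Int.toChars i).length ≤ max (PySem.Int.toChars lo).length (PySem.Int.toChars hi).length := by
  have mono : ∀ a b : Nat, a ≤ b → (Nat.toDigits 10 a).length ≤ (Nat.toDigits 10 b).length := by
    intro a b hab
    have hk : 0 < (Nat.toDigits 10 b).length := Nat.length_toDigits_pos
    have hb : b < 10 ^ (Nat.toDigits 10 b).length :=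
      (Nat.length_toDigits_le_iff (by norm_num) hk).mp le_rfl
    exact (Nat.length_toDigits_le_iff (by norm_num) hk).mpr (lt_of_le_of_lt hab hb)
  unfold PySem.Int.toChars
  by_cases hneg : i < 0
  · have hlo : lo < 0 := by omega
    simp only [if_pos hneg, if_pos hlo, List.length_cons]
    have : i.natAbs ≤ lo.natAbs := by omega
    exact le_max_of_le_left (by simpa using Nat.add_le_add_right (mono _ _ this) 1)
  · have hhi : ¬ hi < 0 := by omega
    simp only [if_neg hneg, if_neg hhi]
    have : i.toNat ≤ hi.toNat := by omega
    exact le_max_of_le_right (mono _ _ this)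

theorem toChars_ne_nil (i : Int) : PySem.Int.toChars i ≠ [] := by
  unfold PySem.Int.toChars
  split
  · exact List.cons_ne_nil _ _
  · have : 0 < (Nat.toDigits 10 i.toNat).length := Nat.length_toDigits_pos
    exact fun h => by simp [h] at this

-- the two early-exit counter loops agree when the tests agree pointwise on [i, b)
theorem ccLoop_eq (s : List Char) (subs : PySem.Set (List Char)) (b : Int) :
    ∀ (n : Nat) (i : Int), (b - i).toNat = n →
    (∀ j, i ≤ j → j < b → PySem.Chars.isIn (PySem.Int.toChars j) s = PySem.Set.contains subs (PySem.Int.toChars j)) →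
    ccLoopA s i b = ccLoopB subs i b := by
  intro n
  induction n with
  | zero =>
      intro i hn _
      rw [ccLoopA, ccLoopB, if_neg (by omega), if_neg (by omega)]
  | succ n ih =>
      intro i hn h
      have hib : i < b := by omega
      rw [ccLoopA, ccLoopB, if_pos hib, if_pos hib, h i le_rfl hib]
      cases PySem.Set.contains subs (PySem.Int.toChars i) with
      | false => simp
      | true =>
          simp only [Bool.true_eq_false, if_pos]
          exact ih (i + 1) (by omega) (fun j h1 h2 => h j (by omega) h2)

-- ===== VERDICT (by name: the statement is the Claim_ definition above) =====
theorem consecutive_combo_spec : Claim_equal_consecutive_combo := by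
  intro lst1 lst2 _hdom hpre
  unfold Spec_consecutive_combo consecutive_combo consecutive_combo_alt
  simp only []
  obtain ⟨m, hm⟩ : ∃ m, PySem.List.min? (lst1 ++ lst2) (fun x => x) = some m := by
    cases h : PySem.List.min? (lst1 ++ lst2) (fun x => x) with
    | none => exact absurd ((PySem.List.min?_eq_none_iff _ _).mp h) hpre
    | some m => exact ⟨m, rfl⟩
  obtain ⟨M, hM⟩ : ∃ M, PySem.List.max? (lst1 ++ lst2) (fun x => x) = some M := by
    cases h : PySem.List.max? (lst1 ++ lst2) (fun x => x) with
    | none => exact absurd ((PySem.List.max?_eq_none_iff _ _).mp h) hpre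
    | some M => exact ⟨M, rfl⟩
  rw [hm, hM, ccFold_eq]
  simp only [List.nil_append]
  apply ccLoop_eq _ _ _ ((M + 1 - m).toNat) m rfl
  intro i h1 h2
  have hlen := toChars_len_le m i M h1 (by omega)
  have hne := toChars_ne_nil i
  cases h : PySem.Set.contains (ccCollect (((PySem.List.sorted (lst1 ++ lst2) (fun x => x) false).map PySem.Int.toChars).flatten) (max (PySem.Int.toChars m).length (PySem.Int.toChars M).length) PySem.Set.empty) (PySem.Int.toChars i) with
  | true =>
      have := (PySem.Set.contains_iff _ _).mp h
      rw [(mem_ccCollect_iff_infix _ _ _ hne hlen)] at this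
      exact (PySem.Chars.isIn_iff_infix _ _).mpr this
  | false =>
      apply (PySem.Chars.isIn_eq_false_iff _ _).mpr
      intro hinf
      have : PySem.Int.toChars i ∈ ccCollect (((PySem.List.sorted (lst1 ++ lst2) (fun x => x) false).map PySem.Int.toChars).flatten) (max (PySem.Int.toChars m).length (PySem.Int.toChars M).length) PySem.Set.empty :=
        (mem_ccCollect_iff_infix _ _ _ hne hlen).mpr hinf
      have := (PySem.Set.contains_iff _ _).mpr this
      rw [h] at this
      exact Bool.false_ne_true this
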